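-- pv_equiv track=rewrite | github.com/pytorch/text | test/common/torchtext_test_case.py | make_mock_dataset
-- ===== SOURCE A (Python) =====
-- def make_mock_dataset(num_examples=30, num_labels=3):
--     num_repetitions = int(round(num_examples / num_labels)) + 1
--
--     texts = [str(i) for i in range(num_examples)]
--     labels = list(range(num_labels)) * num_repetitions
--     labels = [str(l) for l in labels[:num_examples]]
--
--     dict_dataset = [
--         {'text': t, 'label': l} for t, l in zip(texts, labels)
--     ]
--     return dict_dataset
-- ===== SOURCE B (Python) =====
-- def make_mock_dataset(num_examples=30, num_labels=3):
--     return [{'text': str(i), 'label': str(i % num_labels)}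
--             for i in range(num_examples)]
-- ===== Notes on version B (the rewrite author's own statement) =====
-- stated objective: simpler
-- what changed: Replaces the build-a-cycled-label-table / slice / zip construction with a single comprehension computing each label directly as str(i % num_labels).
-- outside the precondition, e.g. on make_mock_dataset(1, -2): A returns [], B returns [{'text': '0', 'label': '0'}]
-- crash fix: For num_labels == 0 with num_examples <= 0, A raises ZeroDivisionError at the up-front num_examples / num_labels while B returns the empty list. — e.g. on make_mock_dataset(0, 0): A raises ZeroDivisionError, B returns []
import Mathlib
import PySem

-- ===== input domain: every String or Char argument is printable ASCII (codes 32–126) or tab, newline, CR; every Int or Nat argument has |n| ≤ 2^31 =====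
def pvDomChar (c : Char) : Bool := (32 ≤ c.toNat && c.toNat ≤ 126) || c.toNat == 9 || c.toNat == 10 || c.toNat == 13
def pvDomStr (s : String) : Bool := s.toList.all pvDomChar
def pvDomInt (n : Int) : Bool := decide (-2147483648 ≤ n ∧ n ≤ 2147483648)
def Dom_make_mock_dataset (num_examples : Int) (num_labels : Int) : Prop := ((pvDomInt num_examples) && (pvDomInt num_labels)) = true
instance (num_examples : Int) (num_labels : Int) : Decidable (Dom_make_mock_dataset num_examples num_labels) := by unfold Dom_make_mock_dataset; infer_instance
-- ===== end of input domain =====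

-- B replaces A's cycled-label-table / slice / zip construction by one comprehension with label = str(i % num_labels): simpler, same cost.

-- ===== PORT A =====
-- int(round(a / b)): round-half-to-even of the exact quotient; exact for |a|,|b| ≤ 2^31
-- (the float quotient is always strictly inside the same half-integer interval as a/b there, and exact at ties).
def pyRoundDiv (a b : Int) : Int :=
  if 2 * (a - PySem.Int.floordiv a b * b).natAbs < b.natAbs then PySem.Int.floordiv a b
  else if b.natAbs < 2 * (a - PySem.Int.floordiv a b * b).natAbs then PySem.Int.floordiv a b + 1
  else if PySem.Int.floordiv a b % 2 = 0 then PySem.Int.floordiv a b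
  else PySem.Int.floordiv a b + 1

def make_mock_dataset (num_examples : Int) (num_labels : Int) : List (List (String × String)) :=
  let num_repetitions := pyRoundDiv num_examples num_labels + 1
  let texts := (PySem.List.pyRange 0 num_examples 1).map PySem.Int.toStr
  let labels0 := (List.range num_repetitions.toNat).flatMap (fun _ => PySem.List.pyRange 0 num_labels 1)
  let labels := (PySem.List.slice labels0 none (some num_examples)).map PySem.Int.toStr
  (texts.zip labels).map (fun tl => [("text", tl.1), ("label", tl.2)])

-- ===== PORT B =====
def make_mock_dataset_alt (num_examples : Int) (num_labels : Int) : List (List (String × String)) :=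
  (PySem.List.pyRange 0 num_examples 1).map (fun i =>
    [("text", PySem.Int.toStr i), ("label", PySem.Int.toStr (PySem.Int.mod i num_labels))])

-- ===== PRECONDITION & SPEC =====
-- Pre_ excludes non-positive num_labels (outside the natural domain of a label count): at num_labels = 0
-- A raises ZeroDivisionError, and for negative num_labels A returns the empty dataset as an artefact of the
-- empty cycled label list while B's modulo yields negative labels — neither value is specified.
def Pre_make_mock_dataset (num_examples : Int) (num_labels : Int) : Prop := 1 ≤ num_labels
instance (num_examples : Int) (num_labels : Int) : Decidable (Pre_make_mock_dataset num_examples num_labels) := by unfold Pre_make_mock_dataset; infer_instance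
def pvWitness_make_mock_dataset : Int × Int := (6, 3)

-- For num_labels == 0 with num_examples <= 0, A raises ZeroDivisionError at the up-front division while B returns [].
def Raises_make_mock_dataset (num_examples : Int) (num_labels : Int) : Prop := num_labels = 0 ∧ num_examples ≤ 0
instance (num_examples : Int) (num_labels : Int) : Decidable (Raises_make_mock_dataset num_examples num_labels) := by unfold Raises_make_mock_dataset; infer_instance
def pvRaiseWitness_make_mock_dataset : Int × Int := (0, 0)
def pvRaiseWitnessOut_make_mock_dataset : List (List (String × String)) := []

def Spec_make_mock_dataset (num_examples : Int) (num_labels : Int) (out : List (List (String × String))) : Prop := out = make_mock_dataset_alt num_examples num_labels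
instance (num_examples : Int) (num_labels : Int) (out : List (List (String × String))) : Decidable (Spec_make_mock_dataset num_examples num_labels out) := by unfold Spec_make_mock_dataset; infer_instance

-- ===== CLAIM (what is proved, stated in full; the proofs are below) =====
def Claim_equal_make_mock_dataset : Prop := ∀ (num_examples : Int) (num_labels : Int), Dom_make_mock_dataset num_examples num_labels → Pre_make_mock_dataset num_examples num_labels → Spec_make_mock_dataset num_examples num_labels (make_mock_dataset num_examples num_labels)
def Claim_raises_make_mock_dataset : Prop := (∀ (num_examples : Int) (num_labels : Int), Dom_make_mock_dataset num_examples num_labels → Raises_make_mock_dataset num_examples num_labels → ¬ Pre_make_mock_dataset num_examples num_labels) ∧ (Dom_make_mock_dataset (pvRaiseWitness_make_mock_dataset.1) (pvRaiseWitness_make_mock_dataset.2) ∧ Raises_make_mock_dataset (pvRaiseWitness_make_mock_dataset.1) (pvRaiseWitness_make_mock_dataset.2) ∧ make_mock_dataset_alt (pvRaiseWitness_make_mock_dataset.1) (pvRaiseWitness_make_mock_dataset.2) = pvRaiseWitnessOut_make_mock_dataset)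

-- ===== LEMMAS AND PROOFS =====

-- repeating a list reps times: element i is element i % length of the list
theorem getElem?_flatten_replicate {α : Type} (xs : List α) (reps i : Nat)
    (hi : i < reps * xs.length) :
    (List.replicate reps xs).flatten[i]? = xs[i % xs.length]? := by
  induction reps generalizing i with
  | zero => simp at hi
  | succ n ih =>
    have hmul : (n + 1) * xs.length = n * xs.length + xs.length := Nat.succ_mul n xs.length
    rw [List.replicate_succ, List.flatten_cons, List.getElem?_append]
    by_cases h : i < xs.length
    · simp [h, Nat.mod_eq_of_lt h]
    · push_neg at h
      rw [if_neg (by omega)]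
      have hm : i % xs.length = (i - xs.length) % xs.length := by
        conv_lhs => rw [show i = i - xs.length + xs.length by omega]
        rw [Nat.add_mod_right]
      rw [hm]
      exact ih (i - xs.length) (by omega)

theorem getElem_flatten_replicate {α : Type} (xs : List α) (reps i : Nat)
    (hi : i < reps * xs.length) (h1 : i < (List.replicate reps xs).flatten.length)
    (h2 : i % xs.length < xs.length) :
    (List.replicate reps xs).flatten[i] = xs[i % xs.length] := by
  have := getElem?_flatten_replicate xs reps i hi
  rw [List.getElem?_eq_getElem h1, List.getElem?_eq_getElem h2] at this
  exact Option.some.inj this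

theorem pyRoundDiv_ge_floordiv (a b : Int) : PySem.Int.floordiv a b ≤ pyRoundDiv a b := by
  unfold pyRoundDiv
  split_ifs <;> omega

-- ===== VERDICT (by name: the statement is the Claim_ definition above) =====
theorem make_mock_dataset_spec : Claim_equal_make_mock_dataset := by
  intro ne nl _hdom hpre
  unfold Spec_make_mock_dataset make_mock_dataset make_mock_dataset_alt
  simp only []
  have hnl : (1:Int) ≤ nl := hpre
  by_cases hne : ne ≤ 0
  · rw [PySem.List.pyRange_one_eq_nil (by omega : ne ≤ 0)]
    simp
  · push_neg at hne
    have hne0 : (0:Int) ≤ ne := le_of_lt hne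
    set reps := pyRoundDiv ne nl + 1 with hreps
    set base := PySem.List.pyRange 0 nl 1 with hbase
    have hbaselen : base.length = nl.toNat := by
      simp [hbase, PySem.List.length_pyRange_one]
    have hflat : (List.range reps.toNat).flatMap (fun _ => base)
        = (List.replicate reps.toNat base).flatten := by
      rw [List.flatMap_def, List.map_const', List.length_range]
    have hq := PySem.Int.floordiv_mul_add_mod ne nl
    have hr := PySem.Int.mod_lt ne (b := nl) (by omega)
    have hr0 := PySem.Int.mod_nonneg ne (b := nl) (by omega)
    have hfd0 : 0 ≤ PySem.Int.floordiv ne nl := by nlinarith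
    have hge : ne ≤ reps * nl := by
      have h1 := pyRoundDiv_ge_floordiv ne nl
      nlinarith
    have hrep0 : 0 ≤ reps := by
      have h1 := pyRoundDiv_ge_floordiv ne nl
      omega
    have hlenge : ne.toNat ≤ reps.toNat * nl.toNat := by
      have h2 : (ne.toNat : Int) ≤ ((reps.toNat * nl.toNat : Nat) : Int) := by
        push_cast
        rw [Int.toNat_of_nonneg hne0, Int.toNat_of_nonneg hrep0, Int.toNat_of_nonneg (by omega)]
        exact hge
      exact_mod_cast h2
    have hflatlen : ((List.replicate reps.toNat base).flatten).length = reps.toNat * nl.toNat := by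
      simp [List.length_flatten, hbaselen, Nat.mul_comm]
    rw [hflat, PySem.List.slice_to _ hne0]
    have hlen1 : ((((PySem.List.pyRange 0 ne 1).map PySem.Int.toStr).zip
        ((((List.replicate reps.toNat base).flatten).take ne.toNat).map PySem.Int.toStr)).map
        (fun tl => [("text", tl.1), ("label", tl.2)])).length = ne.toNat := by
      simp only [List.length_map, List.length_zip, List.length_take,
        PySem.List.length_pyRange_one, hflatlen]
      omega
    have hlen2 : ((PySem.List.pyRange 0 ne 1).map (fun i =>
        [("text", PySem.Int.toStr i), ("label", PySem.Int.toStr (PySem.Int.mod i nl))])).length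
        = ne.toNat := by
      simp [PySem.List.length_pyRange_one]
    apply List.ext_getElem (by rw [hlen1, hlen2])
    intro k hk1 hk2
    have hk : k < ne.toNat := by rw [hlen1] at hk1; exact hk1
    have hkflat : k < ((List.replicate reps.toNat base).flatten).length := by omega
    have hnlpos : 0 < nl.toNat := by omega
    have hmodlt : k % nl.toNat < nl.toNat := Nat.mod_lt _ hnlpos
    simp only [List.getElem_map, List.getElem_zip, List.getElem_take,
      PySem.List.getElem_pyRange_one]
    have hfget : ((List.replicate reps.toNat base).flatten)[k]'hkflat
        = ((k % nl.toNat : Nat) : Int) := by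
      rw [getElem_flatten_replicate base reps.toNat k (by rw [hbaselen]; omega) hkflat
        (by rw [hbaselen]; exact hmodlt)]
      simp only [hbase, PySem.List.length_pyRange_one, PySem.List.getElem_pyRange_one]
      simp
    rw [hfget]
    have hmod : PySem.Int.mod ((0:Int) + (k:Int)) nl = ((k % nl.toNat : Nat) : Int) := by
      rw [zero_add]
      conv_lhs => rw [show nl = ((nl.toNat : Nat) : Int) by omega]
      exact PySem.Int.mod_natCast k nl.toNat
    rw [hmod]

@[simp] theorem make_mock_dataset_raises : Claim_raises_make_mock_dataset := by
  unfold Claim_raises_make_mock_dataset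
  constructor
  · intro ne nl _ hr hp
    unfold Raises_make_mock_dataset at hr
    unfold Pre_make_mock_dataset at hp
    omega
  · refine ⟨by decide, by constructor <;> decide, by decide⟩
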